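-- pv_equiv track=rewrite | github.com/CrowdDynamicsLab/StyleInfusion | data_feature_extraction/data_feature_utils.py | count_punctuation
-- ===== SOURCE A (Python) =====
-- def count_punctuation(texts):
--     results = []
--     for text in texts:
--         cnt = {}
--         for punct in '.!?':
--             cnt[punct] = cnt.get(punct, 0) + text.count(punct)
--         results.append(cnt)
--     return results
-- ===== SOURCE B (Python) =====
-- def _punct_counts(text):
--     counts = {'.': 0, '!': 0, '?': 0}
--     for ch in text:
--         if ch in counts:
--             counts[ch] += 1
--     return counts
--
--
-- def count_punctuation(texts):
--     return [_punct_counts(text) for text in texts]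
-- ===== Notes on version B (the rewrite author's own statement) =====
-- stated objective: alternative
-- what changed: B replaces A's three separate substring-count scans per text (one text.count per punctuation mark) with a single pass over the characters of each text that increments a pre-seeded {'.','!','?'} counts dict, built via a per-text helper and a list comprehension.
import Mathlib
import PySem

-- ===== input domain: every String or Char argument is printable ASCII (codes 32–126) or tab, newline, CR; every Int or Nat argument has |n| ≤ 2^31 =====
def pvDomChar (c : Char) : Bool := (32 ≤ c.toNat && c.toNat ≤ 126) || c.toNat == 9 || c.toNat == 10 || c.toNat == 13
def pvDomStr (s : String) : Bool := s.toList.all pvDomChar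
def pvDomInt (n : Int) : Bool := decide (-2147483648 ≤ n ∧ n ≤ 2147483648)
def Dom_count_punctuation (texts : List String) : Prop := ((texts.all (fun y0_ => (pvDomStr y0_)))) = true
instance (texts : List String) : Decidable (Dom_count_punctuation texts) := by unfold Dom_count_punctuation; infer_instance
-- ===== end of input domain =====

-- B replaces A's three per-text substring-count scans with one pass over the characters
-- of each text incrementing a pre-seeded counts dict; same outputs, different traversal.

-- ===== PORT A =====
-- for text in texts: cnt = {}; for punct in '.!?': cnt[punct] = cnt.get(punct, 0) + text.count(punct); results.append(cnt)
def count_punctuation (texts : List String) : List (List (String × Int)) :=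
  texts.foldl (fun results text =>
    results ++ [((".!?".toList.foldl
        (fun (cnt : PySem.Dict String Int) punct =>
          cnt.insert (String.ofList [punct])
            (cnt.getD (String.ofList [punct]) 0 + (PySem.Str.count text (String.ofList [punct]) : Int)))
        PySem.Dict.empty)).items]) []

-- ===== PORT B =====
-- the body of _punct_counts's char loop: if ch in counts: counts[ch] += 1
def pvAltStep (cnt : PySem.Dict String Int) (ch : Char) : PySem.Dict String Int :=
  if cnt.contains (String.ofList [ch]) then cnt.modify (String.ofList [ch]) 0 (· + 1) else cnt

-- _punct_counts(text): pre-seeded dict, one pass over the characters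
def pvPunctCounts (text : String) : PySem.Dict String Int :=
  text.toList.foldl pvAltStep (PySem.Dict.ofList [(".", 0), ("!", 0), ("?", 0)])

def count_punctuation_alt (texts : List String) : List (List (String × Int)) :=
  texts.map (fun text => (pvPunctCounts text).items)

-- ===== PRECONDITION & SPEC =====
def Spec_count_punctuation (texts : List String) (out : List (List (String × Int))) : Prop := out = count_punctuation_alt texts
instance (texts : List String) (out : List (List (String × Int))) : Decidable (Spec_count_punctuation texts out) := by unfold Spec_count_punctuation; infer_instance

-- ===== CLAIM (what is proved, stated in full; the proofs are below) =====
def Claim_equal_count_punctuation : Prop := ∀ (texts : List String), Dom_count_punctuation texts → Spec_count_punctuation texts (count_punctuation texts)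

-- ===== LEMMAS AND PROOFS =====

-- Python's s.count(c) for a single character c is the plain character count.
lemma pv_count_go_single (c : Char) (cs : List Char) (fuel acc : Nat) (h : cs.length ≤ fuel) :
    PySem.Chars.count.go [c] fuel cs acc = acc + cs.count c := by
  induction cs generalizing fuel acc with
  | nil => cases fuel <;> simp [PySem.Chars.count.go]
  | cons x t ih =>
    cases fuel with
    | zero => simp at h
    | succ f =>
      rw [PySem.Chars.count.go]
      by_cases hx : c = x
      · subst hx; simp [List.isPrefixOf, ih _ _ (by simpa using h)]; omega
      · simp [List.isPrefixOf, hx, ih _ _ (by simp at h; omega), Ne.symm hx]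

lemma pv_count_single (cs : List Char) (c : Char) : PySem.Chars.count cs [c] = cs.count c := by
  simp [PySem.Chars.count, pv_count_go_single c cs cs.length 0 le_rfl]

-- A's per-text dict: three inserts of fresh keys into the empty dict.
lemma pv_itemsA (text : String) :
    ((".!?".toList.foldl
        (fun (cnt : PySem.Dict String Int) punct =>
          cnt.insert (String.ofList [punct])
            (cnt.getD (String.ofList [punct]) 0 + (PySem.Str.count text (String.ofList [punct]) : Int)))
        PySem.Dict.empty)).items =
      [(".", (text.toList.count '.' : Int)), ("!", (text.toList.count '!' : Int)),
       ("?", (text.toList.count '?' : Int))] := by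
  show (PySem.Dict.items _) = _
  simp only [show ".!?".toList = ['.', '!', '?'] from rfl, List.foldl]
  simp [PySem.Dict.insert, PySem.Dict.contains, PySem.Dict.getD, PySem.Dict.get?,
    PySem.Dict.empty, PySem.Str.count, pv_count_single]

lemma pv_contains_other (x : Char) (h1 : x ≠ '.') (h2 : x ≠ '!') (h3 : x ≠ '?') (a b c : Int) :
    (PySem.Dict.mk [(".", a), ("!", b), ("?", c)]).contains (String.ofList [x]) = false := by
  have e1 : String.ofList [x] ≠ "." := fun h => h1 (by
    have := congrArg String.toList h; simpa using this)
  have e2 : String.ofList [x] ≠ "!" := fun h => h2 (by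
    have := congrArg String.toList h; simpa using this)
  have e3 : String.ofList [x] ≠ "?" := fun h => h3 (by
    have := congrArg String.toList h; simpa using this)
  simp [PySem.Dict.contains, e1.symm, e2.symm, e3.symm]

-- B's char loop: the invariant over the pre-seeded three-key dict.
lemma pv_loopB (cs : List Char) (a b c : Int) :
    cs.foldl pvAltStep (PySem.Dict.mk [(".", a), ("!", b), ("?", c)]) =
      PySem.Dict.mk [(".", a + cs.count '.'), ("!", b + cs.count '!'), ("?", c + cs.count '?')] := by
  induction cs generalizing a b c with
  | nil => simp
  | cons x t ih =>
    rcases eq_or_ne x '.' with h1 | h1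
    · subst h1
      simp only [List.foldl,
        show pvAltStep (PySem.Dict.mk [(".", a), ("!", b), ("?", c)]) '.' =
          PySem.Dict.mk [(".", a + 1), ("!", b), ("?", c)] by
            simp [pvAltStep, PySem.Dict.modify, PySem.Dict.insert, PySem.Dict.contains,
              PySem.Dict.getD, PySem.Dict.get?], ih, List.count_cons]
      simp; omega
    · rcases eq_or_ne x '!' with h2 | h2
      · subst h2
        simp only [List.foldl,
          show pvAltStep (PySem.Dict.mk [(".", a), ("!", b), ("?", c)]) '!' =
            PySem.Dict.mk [(".", a), ("!", b + 1), ("?", c)] by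
              simp [pvAltStep, PySem.Dict.modify, PySem.Dict.insert, PySem.Dict.contains,
                PySem.Dict.getD, PySem.Dict.get?], ih, List.count_cons]
        simp; omega
      · rcases eq_or_ne x '?' with h3 | h3
        · subst h3
          simp only [List.foldl,
            show pvAltStep (PySem.Dict.mk [(".", a), ("!", b), ("?", c)]) '?' =
              PySem.Dict.mk [(".", a), ("!", b), ("?", c + 1)] by
                simp [pvAltStep, PySem.Dict.modify, PySem.Dict.insert, PySem.Dict.contains,
                  PySem.Dict.getD, PySem.Dict.get?], ih, List.count_cons]
          simp; omega
        · have hstep : pvAltStep (PySem.Dict.mk [(".", a), ("!", b), ("?", c)]) x =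
              PySem.Dict.mk [(".", a), ("!", b), ("?", c)] := by
            simp [pvAltStep, pv_contains_other x h1 h2 h3]
          simp [List.foldl, hstep, ih, h1, h2, h3]

lemma pv_itemsB (text : String) :
    (pvPunctCounts text).items =
      [(".", (text.toList.count '.' : Int)), ("!", (text.toList.count '!' : Int)),
       ("?", (text.toList.count '?' : Int))] := by
  have hof : (PySem.Dict.ofList [(".", 0), ("!", 0), ("?", 0)] : PySem.Dict String Int) =
      PySem.Dict.mk [(".", (0 : Int)), ("!", 0), ("?", 0)] := by decide
  simp [pvPunctCounts, hof, pv_loopB]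

-- ===== VERDICT (by name: the statement is the Claim_ definition above) =====
theorem count_punctuation_spec : Claim_equal_count_punctuation := by
  intro texts _
  show count_punctuation texts = count_punctuation_alt texts
  unfold count_punctuation count_punctuation_alt
  rw [PySem.List.foldl_append_singleton_eq_map]
  exact List.map_congr_left (fun text _ => (pv_itemsA text).trans (pv_itemsB text).symm)
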